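-- pv_equiv track=rewrite | github.com/miliar/Code_Jam_Webscraper | solutions_python/Problem_76/647.py | divisions
-- ===== SOURCE A (Python) =====
-- def divisions(candies, left, right):
-- 	if len(candies) == 1:
-- 		if len(left):  yield [left, right+[candies[0]]]
-- 		if len(right): yield [left+[candies[0]], right]
-- 	else:
-- 		for i in divisions(candies[1:], left+[candies[0]], right):
-- 			yield [i[0], i[1]]
-- 		for i in divisions(candies[1:], left, right+[candies[0]]):
-- 			yield [i[0], i[1]]
-- ===== SOURCE B (Python) =====
-- def divisions(candies, left, right):
--     # Iterative bitmask enumeration instead of recursion: each mask over the first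
--     # n-1 candies picks who gets them; the final candy is then placed right-first,
--     # keeping only splits where both groups end up non-empty.
--     n = len(candies)
--     last = candies[n - 1]
--     for mask in range(1 << (n - 1)):
--         l = list(left)
--         r = list(right)
--         for i in range(n - 1):
--             if (mask >> (n - 2 - i)) & 1:
--                 r.append(candies[i])
--             else:
--                 l.append(candies[i])
--         if l:
--             yield [l, r + [last]]
--         if r:
--             yield [l + [last], r]
-- ===== Notes on version B (the rewrite author's own statement) =====
-- stated objective: alternative
-- what changed: Replaced A's recursion on the candy list by a single iterative loop over bitmasks 0..2^(n-1)-1 that assigns each of the first n-1 candies to a group by its bit and then places the last candy right-first, yielding the same splits in the same order.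
import Mathlib
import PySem

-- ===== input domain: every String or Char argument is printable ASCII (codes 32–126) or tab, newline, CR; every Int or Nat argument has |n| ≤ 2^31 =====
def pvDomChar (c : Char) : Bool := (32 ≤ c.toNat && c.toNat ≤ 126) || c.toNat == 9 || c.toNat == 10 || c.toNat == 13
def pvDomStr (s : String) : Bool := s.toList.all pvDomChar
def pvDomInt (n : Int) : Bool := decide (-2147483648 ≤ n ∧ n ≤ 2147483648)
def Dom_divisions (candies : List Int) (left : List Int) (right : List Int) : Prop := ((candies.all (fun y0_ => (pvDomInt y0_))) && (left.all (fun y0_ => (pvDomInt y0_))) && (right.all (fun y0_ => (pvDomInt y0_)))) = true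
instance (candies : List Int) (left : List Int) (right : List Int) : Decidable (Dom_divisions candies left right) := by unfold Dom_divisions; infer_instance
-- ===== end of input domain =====

-- B replaces A's recursion with an iterative bitmask enumeration of the same splits
-- (objective: alternative decomposition; same output list, same order).
-- Both Pythons are generators; the equivalence is about list(...) of their yields.

-- ===== PORT A =====
-- A recurses on candies; its else-branch yields [i[0], i[1]] for each recursive result.
-- 'i[0]' / 'i[1]' are ported with PySem.List.pyGetD, exact here because every yielded
-- element is a two-element list [l, r] (proved as divisions_shape below).
def divisions : List Int → List Int → List Int → List (List (List Int))
  | [], _, _ => []  -- unreachable under Pre_: Python raises IndexError on empty candies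
  | [c], left, right =>
      (if left.length ≠ 0 then [[left, right ++ [c]]] else []) ++
      (if right.length ≠ 0 then [[left ++ [c], right]] else [])
  | c :: c' :: rest, left, right =>
      ((divisions (c' :: rest) (left ++ [c]) right).map
        (fun i => [PySem.List.pyGetD i 0 [], PySem.List.pyGetD i 1 []])) ++
      ((divisions (c' :: rest) left (right ++ [c])).map
        (fun i => [PySem.List.pyGetD i 0 [], PySem.List.pyGetD i 1 []]))

-- ===== PORT B =====
-- Transcription of Source B: last = candies[n-1] via pyGet? (none = IndexError, excluded by
-- Pre_); masks are the non-negative ints of range(1 << (n-1)), i.e. List.range (2^(n-1));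
-- '(mask >> k) & 1' on a non-negative mask is Nat.testBit mask k; 'candies[i]' for
-- 0 ≤ i < n-1 is candies.getD i 0 (exact in range); the two possible yields per mask
-- concatenate across the mask loop: flatMap.
def divisions_alt (candies : List Int) (left : List Int) (right : List Int) : List (List (List Int)) :=
  let n := candies.length
  match PySem.List.pyGet? candies ((n : Int) - 1) with
  | none => []  -- candies = []: Python raises IndexError here (excluded by Pre_)
  | some last =>
      (List.range (2 ^ (n - 1))).flatMap (fun mask =>
        let lr := (List.range (n - 1)).foldl
          (fun (p : List Int × List Int) i =>
            if Nat.testBit mask (n - 2 - i) then (p.1, p.2 ++ [candies.getD i 0])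
            else (p.1 ++ [candies.getD i 0], p.2)) (left, right)
        (if lr.1 ≠ [] then [[lr.1, lr.2 ++ [last]]] else []) ++
        (if lr.2 ≠ [] then [[lr.1 ++ [last], lr.2]] else []))

-- ===== PRECONDITION & SPEC =====
-- Pre_ excludes exactly candies = [], where the Python A raises IndexError.
def Pre_divisions (candies : List Int) (left : List Int) (right : List Int) : Prop :=
  candies ≠ []
instance (candies : List Int) (left : List Int) (right : List Int) : Decidable (Pre_divisions candies left right) := by unfold Pre_divisions; infer_instance

def pvWitness_divisions : List Int × List Int × List Int := ([1, 2, 3], [], [])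

def Spec_divisions (candies : List Int) (left : List Int) (right : List Int) (out : List (List (List Int))) : Prop := out = divisions_alt candies left right
instance (candies : List Int) (left : List Int) (right : List Int) (out : List (List (List Int))) : Decidable (Spec_divisions candies left right out) := by unfold Spec_divisions; infer_instance

-- ===== CLAIM (what is proved, stated in full; the proofs are below) =====
def Claim_equal_divisions : Prop := ∀ (candies : List Int) (left : List Int) (right : List Int), Dom_divisions candies left right → Pre_divisions candies left right → Spec_divisions candies left right (divisions candies left right)

-- ===== LEMMAS AND PROOFS =====

-- every element yielded by A is a two-element list [a, b]
theorem divisions_shape (candies left right : List Int) :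
    ∀ x ∈ divisions candies left right, ∃ a b, x = [a, b] := by
  induction candies generalizing left right with
  | nil => simp [divisions]
  | cons c rest ih =>
    cases rest with
    | nil =>
      intro x hx
      simp only [divisions] at hx
      rcases List.mem_append.1 hx with h | h <;> split at h <;> simp_all
    | cons c' rest' =>
      intro x hx
      simp only [divisions] at hx
      rcases List.mem_append.1 hx with h | h <;>
        · rcases List.mem_map.1 h with ⟨i, _, rfl⟩
          exact ⟨_, _, rfl⟩

-- the 'yield [i[0], i[1]]' re-packing is the identity on A's results
theorem divisions_map_id (candies left right : List Int) :
    (divisions candies left right).map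
      (fun i => [PySem.List.pyGetD i 0 [], PySem.List.pyGetD i 1 []]) =
    divisions candies left right := by
  rw [List.map_congr_left (g := id), List.map_id]
  intro x hx
  obtain ⟨a, b, rfl⟩ := divisions_shape candies left right x hx
  simp [PySem.List.pyGetD_zero_cons]
  rw [show (1 : Int) = ((1 : Nat) : Int) by norm_num, PySem.List.pyGetD_natCast]
  rfl

-- the inner fold of divisions_alt, factored out for the proofs
def lrfold (candies left right : List Int) (mask : Nat) : List Int × List Int :=
  (List.range (candies.length - 1)).foldl
    (fun (p : List Int × List Int) i =>
      if Nat.testBit mask (candies.length - 2 - i) then (p.1, p.2 ++ [candies.getD i 0])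
      else (p.1 ++ [candies.getD i 0], p.2)) (left, right)

-- the per-mask yields of divisions_alt, factored out for the proofs
def body (candies left right : List Int) (last : Int) (mask : Nat) : List (List (List Int)) :=
  let lr := lrfold candies left right mask
  (if lr.1 ≠ [] then [[lr.1, lr.2 ++ [last]]] else []) ++
  (if lr.2 ≠ [] then [[lr.1 ++ [last], lr.2]] else [])

theorem pyGet?_len_sub_one (xs : List Int) :
    PySem.List.pyGet? xs ((xs.length : Int) - 1) = xs.getLast? := by
  cases xs with
  | nil => rfl
  | cons x xs =>
    rw [show ((x :: xs).length : Int) - 1 = ((xs.length : Nat) : Int) by simp,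
      PySem.List.pyGet?_natCast, List.getLast?_eq_getElem?]
    simp

theorem alt_eq_body (candies left right : List Int) (last : Int)
    (h : candies.getLast? = some last) :
    divisions_alt candies left right =
      (List.range (2 ^ (candies.length - 1))).flatMap (body candies left right last) := by
  simp only [divisions_alt, pyGet?_len_sub_one, h]
  rfl

theorem range_succ_eq (n : Nat) : List.range (n + 1) = 0 :: (List.range n).map (· + 1) := by
  rw [show n + 1 = 1 + n by omega, List.range_add]
  simp [Nat.add_comm]

theorem range_two_pow (m : Nat) (hm : 1 ≤ m) :
    List.range (2 ^ m) = List.range (2 ^ (m - 1)) ++ (List.range (2 ^ (m - 1))).map (2 ^ (m - 1) + ·) := by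
  have h2 : 2 ^ m = 2 ^ (m - 1) + 2 ^ (m - 1) := by
    rw [← Nat.two_pow_succ, Nat.sub_add_cancel hm]
  rw [h2, List.range_add]

-- one step of the fold: the first candy goes to the side named by the top bit,
-- the rest of the fold only reads the lower bits
theorem lrfold_cons (c : Int) (cs left right : List Int) (mask mask' : Nat)
    (hm : cs ≠ [])
    (hlow : ∀ k, k < cs.length - 1 → mask.testBit k = mask'.testBit k) :
    lrfold (c :: cs) left right mask =
      if mask.testBit (cs.length - 1) then lrfold cs left (right ++ [c]) mask'
      else lrfold cs (left ++ [c]) right mask' := by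
  obtain ⟨m, hm'⟩ : ∃ m, cs.length = m + 1 :=
    ⟨cs.length - 1, by have := List.length_pos_of_ne_nil hm; omega⟩
  unfold lrfold
  simp only [List.length_cons, hm', Nat.add_sub_cancel]
  rw [range_succ_eq, List.foldl_cons, List.foldl_map]
  rw [show m + 1 + 1 - 2 - 0 = m by omega]
  have hstep : ∀ (p : List Int × List Int), ∀ i ∈ List.range m,
      (fun (p : List Int × List Int) i =>
        if Nat.testBit mask (m + 1 + 1 - 2 - i) then (p.1, p.2 ++ [(c :: cs).getD i 0])
        else (p.1 ++ [(c :: cs).getD i 0], p.2)) p (i + 1) =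
      (fun (p : List Int × List Int) i =>
        if Nat.testBit mask' (m + 1 - 2 - i) then (p.1, p.2 ++ [cs.getD i 0])
        else (p.1 ++ [cs.getD i 0], p.2)) p i := by
    intro p i hi
    have hi' : i < m := List.mem_range.mp hi
    have hidx : m + 1 + 1 - 2 - (i + 1) = m - 1 - i := by omega
    have hidx2 : m + 1 - 2 - i = m - 1 - i := by omega
    have hbit : mask.testBit (m - 1 - i) = mask'.testBit (m - 1 - i) := by
      apply hlow; omega
    simp only [hidx, hidx2, hbit, List.getD_cons_succ]
  by_cases hb : mask.testBit m
  · simp only [hb, if_true, List.getD_cons_zero]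
    apply PySem.List.foldl_congr_mem
    exact fun p i hi => hstep p i hi
  · simp only [hb, if_false, Bool.false_eq_true, List.getD_cons_zero]
    apply PySem.List.foldl_congr_mem
    exact fun p i hi => hstep p i hi

theorem flatMap_congr_mem {α β : Type} (l : List α) (f g : α → List β)
    (h : ∀ x ∈ l, f x = g x) : l.flatMap f = l.flatMap g := by
  rw [List.flatMap_def, List.map_congr_left h, ← List.flatMap_def]

-- B on a single candy is exactly A's base case
theorem alt_single (c : Int) (left right : List Int) :
    divisions_alt [c] left right =
      (if left.length ≠ 0 then [[left, right ++ [c]]] else []) ++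
      (if right.length ≠ 0 then [[left ++ [c], right]] else []) := by
  simp [divisions_alt, List.range_one, List.range_zero]

-- B satisfies A's recurrence: split the mask range at its top bit
theorem alt_step (c c' : Int) (rest left right : List Int) :
    divisions_alt (c :: c' :: rest) left right =
      divisions_alt (c' :: rest) (left ++ [c]) right ++
      divisions_alt (c' :: rest) left (right ++ [c]) := by
  obtain ⟨last, hl⟩ : ∃ last, (c' :: rest).getLast? = some last := by
    cases h : (c' :: rest).getLast? with
    | none => simp at h
    | some v => exact ⟨v, rfl⟩
  have hl2 : (c :: c' :: rest).getLast? = some last := by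
    rwa [List.getLast?_cons_cons]
  set m := (c' :: rest).length with hmdef
  have hm1 : 1 ≤ m := by simp [hmdef]
  rw [alt_eq_body _ _ _ _ hl2, alt_eq_body _ _ _ _ hl, alt_eq_body _ _ _ _ hl]
  have hlen1 : (c :: c' :: rest).length - 1 = m := by simp [hmdef]
  rw [hlen1, range_two_pow m hm1, List.flatMap_append]
  congr 1
  · apply flatMap_congr_mem
    intro mask hmask
    have hmask' : mask < 2 ^ (m - 1) := List.mem_range.mp hmask
    unfold body
    rw [lrfold_cons c (c' :: rest) left right mask mask (by simp) (fun k _ => rfl),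
      Nat.testBit_lt_two_pow (by rw [← hmdef]; exact hmask')]
    simp
  · rw [List.flatMap_map]
    apply flatMap_congr_mem
    intro mask hmask
    have hmask' : mask < 2 ^ (m - 1) := List.mem_range.mp hmask
    unfold body
    have hbit : (2 ^ (m - 1) + mask).testBit ((c' :: rest).length - 1) = true := by
      rw [← hmdef, Nat.testBit_two_pow_add_eq, Nat.testBit_lt_two_pow hmask']; rfl
    rw [lrfold_cons c (c' :: rest) left right (2 ^ (m - 1) + mask) mask (by simp)
        (fun k hk => Nat.testBit_two_pow_add_gt (by rw [← hmdef] at hk; omega) mask),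
      hbit]
    simp

theorem divisions_eq_alt (candies left right : List Int) (h : candies ≠ []) :
    divisions candies left right = divisions_alt candies left right := by
  induction candies generalizing left right with
  | nil => exact absurd rfl h
  | cons c rest ih =>
    cases rest with
    | nil => rw [alt_single]; rfl
    | cons c' rest' =>
      simp only [divisions, divisions_map_id]
      rw [ih _ _ (by simp), ih _ _ (by simp), alt_step]

-- ===== VERDICT (by name: the statement is the Claim_ definition above) =====
theorem divisions_spec : Claim_equal_divisions := by
  intro candies left right _ hpre
  exact divisions_eq_alt candies left right hpre
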